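-- pv_equiv track=rewrite | github.com/UChiSeclab/wedge | code-contest-exp/scripts/evaluate/usefulness/prompt_exp/stats.py | get_pass_k_raw_stats
-- ===== SOURCE A (Python) =====
-- from typing import Dict, List
--
-- def get_pass_k_raw_stats(all_problems_correctness_stats: Dict, k_list: List[int]) -> float:
--     """
--     Get the pass@k raw statistics
--     """
--     pass_k_raw_stats = {} # problem_id -> pass@k (1 or 0)
--     for problem_id, correctness_stats in all_problems_correctness_stats.items():
--         pass_k_raw_stats[problem_id] = {}
--         for k in k_list:
--             pass_k_raw_stats[problem_id][k] = 0
--         for solution_file_id, correctness in correctness_stats.items():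
--             # solution_file_id format: solution_i_extracted
--             idx = int(solution_file_id.split("_")[1])
--             if correctness == "correct":
--                 for k in k_list:
--                     if idx <= k:
--                         pass_k_raw_stats[problem_id][k] = 1
--
--     return pass_k_raw_stats
-- ===== SOURCE B (Python) =====
-- def get_pass_k_raw_stats(all_problems_correctness_stats, k_list):
--     """Aggregate-then-emit: find each problem's minimum correct solution index
--     in one pass, then emit the per-k flags from it."""
--     pass_k_raw_stats = {}
--     for problem_id, correctness_stats in all_problems_correctness_stats.items():
--         min_correct_idx = None
--         for solution_file_id, correctness in correctness_stats.items():
--             idx = int(solution_file_id.split("_")[1])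
--             if correctness == "correct" and (min_correct_idx is None or idx < min_correct_idx):
--                 min_correct_idx = idx
--         pass_k_raw_stats[problem_id] = {
--             k: (1 if min_correct_idx is not None and min_correct_idx <= k else 0)
--             for k in k_list
--         }
--     return pass_k_raw_stats
-- ===== Notes on version B (the rewrite author's own statement) =====
-- stated objective: alternative
-- what changed: B replaces A's scatter shape (initialise every k to 0, then let every correct solution overwrite all k >= idx) by an aggregate-then-emit shape: one pass computing the minimum correct solution index per problem, then one pass over k_list emitting each flag directly.
import Mathlib
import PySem

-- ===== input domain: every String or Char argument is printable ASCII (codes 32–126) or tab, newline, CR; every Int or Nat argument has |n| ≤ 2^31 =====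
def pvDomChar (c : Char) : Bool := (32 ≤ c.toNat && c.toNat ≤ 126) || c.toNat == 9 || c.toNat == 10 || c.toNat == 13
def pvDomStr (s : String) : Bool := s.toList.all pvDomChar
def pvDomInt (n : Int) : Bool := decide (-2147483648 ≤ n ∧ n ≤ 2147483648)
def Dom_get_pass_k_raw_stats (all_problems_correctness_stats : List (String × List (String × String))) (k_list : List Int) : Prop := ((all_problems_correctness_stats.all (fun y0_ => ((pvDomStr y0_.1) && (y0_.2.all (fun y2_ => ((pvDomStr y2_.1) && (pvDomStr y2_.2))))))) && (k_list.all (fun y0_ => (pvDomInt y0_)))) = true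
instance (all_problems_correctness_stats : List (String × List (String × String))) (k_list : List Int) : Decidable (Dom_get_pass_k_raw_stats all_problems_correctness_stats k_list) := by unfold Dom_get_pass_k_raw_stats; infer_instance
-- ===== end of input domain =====

-- B replaces A's per-solution scatter over all k by: compute the minimum correct solution
-- index per problem in one pass, then emit each k-flag from it (alternative decomposition).

-- ===== PORT A =====
-- idx = int(solution_file_id.split("_")[1]); none = IndexError/ValueError (excluded by Pre_).
def pvParseIdx? (sid : String) : Option Int :=
  ((PySem.Str.split? sid "_").bind (fun parts => PySem.List.pyGet? parts 1)).bind PySem.Int.ofStr?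

-- A's inner body: flags all 0, then every correct solution sets every k with idx ≤ k to 1.
-- '(… ).getD 0' is reached only outside Pre_ (Python raises there).
def pvInnerA (k_list : List Int) (sols : List (String × String)) : PySem.Dict Int Int :=
  let d0 := k_list.foldl (fun (d : PySem.Dict Int Int) k => d.insert k 0) PySem.Dict.empty
  sols.foldl
    (fun d sp =>
      let idx := (pvParseIdx? sp.1).getD 0
      if sp.2 == "correct" then
        k_list.foldl (fun d k => if idx ≤ k then d.insert k 1 else d) d
      else d) d0

def get_pass_k_raw_stats (all_problems_correctness_stats : List (String × List (String × String))) (k_list : List Int) : List (String × List (Int × Int)) :=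
  ((PySem.Dict.ofList all_problems_correctness_stats).items.foldl
    (fun (acc : PySem.Dict String (PySem.Dict Int Int)) pr =>
      acc.insert pr.1 (pvInnerA k_list (PySem.Dict.ofList pr.2).items))
    PySem.Dict.empty).items.map (fun p => (p.1, p.2.items))

-- ===== PORT B =====
-- running minimum of idx over the correct solutions ('min_correct_idx' loop of Source B)
def pvMinFold (sols : List (String × String)) : Option Int :=
  sols.foldl
    (fun m sp =>
      let idx := (pvParseIdx? sp.1).getD 0
      if sp.2 == "correct" && (match m with | none => true | some v => decide (idx < v))
      then some idx else m) none

-- 1 if min_correct_idx is not None and min_correct_idx <= k else 0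
def pvFlag (mi : Option Int) (k : Int) : Int :=
  match mi with | none => 0 | some v => if v ≤ k then 1 else 0

-- the dict comprehension {k: flag for k in k_list}
def pvInnerB (k_list : List Int) (sols : List (String × String)) : PySem.Dict Int Int :=
  let mi := pvMinFold sols
  k_list.foldl (fun (d : PySem.Dict Int Int) k => d.insert k (pvFlag mi k)) PySem.Dict.empty

def get_pass_k_raw_stats_alt (all_problems_correctness_stats : List (String × List (String × String))) (k_list : List Int) : List (String × List (Int × Int)) :=
  ((PySem.Dict.ofList all_problems_correctness_stats).items.foldl
    (fun (acc : PySem.Dict String (PySem.Dict Int Int)) pr =>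
      acc.insert pr.1 (pvInnerB k_list (PySem.Dict.ofList pr.2).items))
    PySem.Dict.empty).items.map (fun p => (p.1, p.2.items))

-- ===== PRECONDITION & SPEC =====
-- Pre_ excludes exactly the inputs where Python A raises: some solution_file_id that A
-- actually iterates over (i.e. of the surviving duplicate problem entry) has no "_"-field
-- index 1 or its field is not int-parseable (IndexError/ValueError).
def Pre_get_pass_k_raw_stats (all_problems_correctness_stats : List (String × List (String × String))) (k_list : List Int) : Prop :=
  ∀ pr ∈ (PySem.Dict.ofList all_problems_correctness_stats).items, ∀ sp ∈ pr.2, pvParseIdx? sp.1 ≠ none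
instance (all_problems_correctness_stats : List (String × List (String × String))) (k_list : List Int) : Decidable (Pre_get_pass_k_raw_stats all_problems_correctness_stats k_list) := by unfold Pre_get_pass_k_raw_stats; infer_instance

def pvWitness_get_pass_k_raw_stats : (List (String × List (String × String))) × List Int :=
  ([("p1", [("solution_0_extracted", "correct"), ("solution_2_extracted", "wrong")])], [1, 3])

def Spec_get_pass_k_raw_stats (all_problems_correctness_stats : List (String × List (String × String))) (k_list : List Int) (out : List (String × List (Int × Int))) : Prop := out = get_pass_k_raw_stats_alt all_problems_correctness_stats k_list
instance (all_problems_correctness_stats : List (String × List (String × String))) (k_list : List Int) (out : List (String × List (Int × Int))) : Decidable (Spec_get_pass_k_raw_stats all_problems_correctness_stats k_list out) := by unfold Spec_get_pass_k_raw_stats; infer_instance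

-- ===== CLAIM (what is proved, stated in full; the proofs are below) =====
def Claim_equal_get_pass_k_raw_stats : Prop := ∀ (all_problems_correctness_stats : List (String × List (String × String))) (k_list : List Int), Dom_get_pass_k_raw_stats all_problems_correctness_stats k_list → Pre_get_pass_k_raw_stats all_problems_correctness_stats k_list → Spec_get_pass_k_raw_stats all_problems_correctness_stats k_list (get_pass_k_raw_stats all_problems_correctness_stats k_list)

-- ===== LEMMAS AND PROOFS =====

theorem pv_witness_ok : Dom_get_pass_k_raw_stats pvWitness_get_pass_k_raw_stats.1 pvWitness_get_pass_k_raw_stats.2 ∧ Pre_get_pass_k_raw_stats pvWitness_get_pass_k_raw_stats.1 pvWitness_get_pass_k_raw_stats.2 := by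
  decide

-- value of an unconditional insert loop whose value depends only on the key
theorem pv_getD_insertFun (l : List Int) (f : Int → Int) (d : PySem.Dict Int Int) (x : Int) :
    (l.foldl (fun d k => d.insert k (f k)) d).getD x 0 = if x ∈ l then f x else d.getD x 0 := by
  induction l generalizing d with
  | nil => simp
  | cons a l ih =>
    simp only [List.foldl_cons, ih, PySem.Dict.getD_insert, List.mem_cons]
    by_cases hl : x ∈ l <;> by_cases ha : x = a <;> simp [hl, ha]

-- value of A's conditional overwrite loop
theorem pv_getD_condFold (l : List Int) (idx : Int) (d : PySem.Dict Int Int) (x : Int) :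
    (l.foldl (fun d k => if idx ≤ k then d.insert k 1 else d) d).getD x 0
      = if x ∈ l ∧ idx ≤ x then 1 else d.getD x 0 := by
  induction l generalizing d with
  | nil => simp
  | cons a l ih =>
    simp only [List.foldl_cons, ih, List.mem_cons]
    by_cases hl : x ∈ l ∧ idx ≤ x
    · simp [hl]
    · by_cases ha : x = a
      · subst ha
        by_cases hi : idx ≤ x <;> simp [hi, hl, PySem.Dict.getD_insert]
      · by_cases hi : idx ≤ a <;> simp [hi, ha, hl, PySem.Dict.getD_insert]

-- keys of the conditional overwrite loop when every key is already present
theorem pv_keys_condFold (l : List Int) (idx : Int) (d : PySem.Dict Int Int)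
    (h : ∀ k ∈ l, k ∈ d.keys) :
    (l.foldl (fun d k => if idx ≤ k then d.insert k 1 else d) d).keys = d.keys := by
  induction l generalizing d with
  | nil => rfl
  | cons a l ih =>
    simp only [List.foldl_cons]
    by_cases hi : idx ≤ a
    · have hc : d.contains a = true := by
        rw [PySem.Dict.contains_iff_mem_keys]; exact h a (List.mem_cons_self ..)
      have hk : (d.insert a 1).keys = d.keys := PySem.Dict.keys_insert_of_contains _ _ hc
      rw [if_pos hi, ih (d.insert a 1) (by intro k hkl; rw [hk]; exact h k (List.mem_cons_of_mem _ hkl))]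
      exact hk
    · rw [if_neg hi]
      exact ih d (fun k hkl => h k (List.mem_cons_of_mem _ hkl))

theorem pv_keys_innerA (k_list : List Int) (sols : List (String × String)) :
    (pvInnerA k_list sols).keys = PySem.Set.ofList k_list := by
  unfold pvInnerA
  have hd0 : (k_list.foldl (fun (d : PySem.Dict Int Int) k => d.insert k 0) PySem.Dict.empty).keys
      = PySem.Set.ofList k_list := by
    rw [PySem.Dict.keys_foldl_insert (f := fun _ _ => 0)]
    simp [PySem.Set.update_nil_left]
  generalize hgen : (k_list.foldl (fun (d : PySem.Dict Int Int) k => d.insert k 0) PySem.Dict.empty) = d0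
  rw [hgen] at hd0
  clear hgen
  induction sols generalizing d0 with
  | nil => simpa using hd0
  | cons sp sols ih =>
    simp only [List.foldl_cons]
    by_cases hc : sp.2 == "correct"
    · simp only [hc, if_pos]
      apply ih
      rw [pv_keys_condFold _ _ _ (by intro k hk; rw [hd0]; exact (PySem.Set.mem_ofList _ _).mpr hk)]
      exact hd0
    · rw [if_neg (by simpa using hc)]
      exact ih d0 hd0

theorem pv_keys_innerB (k_list : List Int) (sols : List (String × String)) :
    (pvInnerB k_list sols).keys = PySem.Set.ofList k_list := by
  unfold pvInnerB
  rw [PySem.Dict.keys_foldl_insert (f := fun _ k => pvFlag (pvMinFold sols) k)]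
  simp [PySem.Set.update_nil_left]

-- the per-solution hit predicate at threshold x
def pvHit (x : Int) (sp : String × String) : Bool :=
  sp.2 == "correct" && decide ((pvParseIdx? sp.1).getD 0 ≤ x)

theorem pv_getD_solFold (k_list : List Int) (sols : List (String × String)) (x : Int) (hx : x ∈ k_list)
    (d : PySem.Dict Int Int) :
    (sols.foldl
      (fun d sp =>
        if sp.2 == "correct" then
          k_list.foldl (fun d k => if (pvParseIdx? sp.1).getD 0 ≤ k then d.insert k 1 else d) d
        else d) d).getD x 0
      = if sols.any (pvHit x) then 1 else d.getD x 0 := by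
  induction sols generalizing d with
  | nil => simp
  | cons sp sols ih =>
    simp only [List.foldl_cons, List.any_cons]
    by_cases hc : sp.2 == "correct"
    · simp only [if_pos hc]
      rw [ih, pv_getD_condFold]
      by_cases hi : (pvParseIdx? sp.1).getD 0 ≤ x <;>
        by_cases ha : sols.any (pvHit x) = true <;>
        simp [pvHit, hc, hi, hx, ha]
    · rw [if_neg (by simpa using hc), ih]
      by_cases ha : sols.any (pvHit x) = true <;> simp [pvHit, hc, ha]

theorem pv_getD_innerA (k_list : List Int) (sols : List (String × String)) (x : Int) (hx : x ∈ k_list) :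
    (pvInnerA k_list sols).getD x 0 = if sols.any (pvHit x) then 1 else 0 := by
  unfold pvInnerA
  rw [pv_getD_solFold k_list sols x hx]
  rw [pv_getD_insertFun]
  simp [hx]

-- 'the running minimum is ≤ x' as a Bool
def pvMle (m : Option Int) (x : Int) : Bool :=
  match m with | none => false | some v => decide (v ≤ x)

theorem pv_mle_fold (sols : List (String × String)) (m : Option Int) (x : Int) :
    pvMle (sols.foldl
      (fun m sp =>
        if sp.2 == "correct" && (match m with | none => true | some v => decide ((pvParseIdx? sp.1).getD 0 < v))
        then some ((pvParseIdx? sp.1).getD 0) else m) m) x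
      = (sols.any (pvHit x) || pvMle m x) := by
  induction sols generalizing m with
  | nil => simp
  | cons sp sols ih =>
    simp only [List.foldl_cons, List.any_cons, ih]
    set idx := (pvParseIdx? sp.1).getD 0 with hidx
    by_cases hc : sp.2 == "correct"
    · cases m with
      | none =>
        simp only [hc, Bool.true_and, pvMle]
        by_cases hix : idx ≤ x <;> simp [pvHit, hc, ← hidx, hix, pvMle]
      | some v =>
        by_cases hlt : idx < v
        · have hs : (if sp.2 == "correct" && (match (some v : Option Int) with | none => true | some v => decide (idx < v)) then some idx else some v) = some idx := by
            simp [hc, hlt]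
          rw [hs]
          simp only [pvMle, pvHit, hc, ← hidx]
          by_cases hix : idx ≤ x
          · simp [hix]
          · have hvx : ¬ v ≤ x := by omega
            simp [hix, hvx]
        · have hs : (if sp.2 == "correct" && (match (some v : Option Int) with | none => true | some v => decide (idx < v)) then some idx else some v) = some v := by
            simp [hc, hlt]
          rw [hs]
          simp only [pvMle, pvHit, hc, ← hidx]
          by_cases hvx : v ≤ x
          · simp [hvx]
          · have hix : ¬ idx ≤ x := by omega
            simp [hix, hvx]
    · have hs : (if sp.2 == "correct" && (match m with | none => true | some v => decide (idx < v)) then some idx else m) = m := by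
        simp [hc]
      rw [hs]
      simp [pvHit, hc]

theorem pv_flag_eq (mi : Option Int) (k : Int) : pvFlag mi k = if pvMle mi k then 1 else 0 := by
  cases mi <;> simp [pvFlag, pvMle]

theorem pv_getD_innerB (k_list : List Int) (sols : List (String × String)) (x : Int) (hx : x ∈ k_list) :
    (pvInnerB k_list sols).getD x 0 = if sols.any (pvHit x) then 1 else 0 := by
  unfold pvInnerB
  rw [pv_getD_insertFun k_list (fun k => pvFlag (pvMinFold sols) k)]
  rw [if_pos hx, pv_flag_eq]
  have : pvMle (pvMinFold sols) x = sols.any (pvHit x) := by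
    unfold pvMinFold
    rw [pv_mle_fold]
    simp [pvMle]
  rw [this]

theorem pv_inner_eq (k_list : List Int) (sols : List (String × String)) :
    pvInnerA k_list sols = pvInnerB k_list sols := by
  apply PySem.Dict.ext
  have hka := pv_keys_innerA k_list sols
  have hkb := pv_keys_innerB k_list sols
  rw [PySem.Dict.items_eq_map_keys _ (by rw [hka]; exact PySem.Set.nodup_ofList _) 0,
      PySem.Dict.items_eq_map_keys _ (by rw [hkb]; exact PySem.Set.nodup_ofList _) 0,
      hka, hkb]
  apply List.map_congr_left
  intro x hxs
  have hx : x ∈ k_list := (PySem.Set.mem_ofList _ _).mp hxs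
  rw [pv_getD_innerA k_list sols x hx, pv_getD_innerB k_list sols x hx]

-- ===== VERDICT (by name: the statement is the Claim_ definition above) =====
theorem get_pass_k_raw_stats_spec : Claim_equal_get_pass_k_raw_stats := by
  intro aps k_list _ _
  unfold Spec_get_pass_k_raw_stats get_pass_k_raw_stats get_pass_k_raw_stats_alt
  simp only [pv_inner_eq]
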